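-- pv_equiv track=rewrite | github.com/apocohq/clawdboard | Sources/ClawdboardLib/Resources/clawdboard-hook.py | _is_command_running
-- ===== SOURCE A (Python) =====
-- def _is_command_running(
--     command: str, parent_pid: int, proc_tree: dict[int, tuple[int, str]]
-- ) -> bool:
--     """Check if command runs as child/grandchild of parent_pid."""
--     children = {pid for pid, (ppid, _) in proc_tree.items() if ppid == parent_pid}
--     descendants = set(children)
--     for pid, (ppid, _) in proc_tree.items():
--         if ppid in children:
--             descendants.add(pid)
--     return any(command in proc_tree[pid][1] for pid in descendants if pid in proc_tree)
-- ===== SOURCE B (Python) =====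
-- def _is_command_running(
--     command: str, parent_pid: int, proc_tree: dict[int, tuple[int, str]]
-- ) -> bool:
--     """Check if command runs as child/grandchild of parent_pid."""
--     for pid, (ppid, cmd) in proc_tree.items():
--         if command in cmd and (
--             ppid == parent_pid
--             or (ppid in proc_tree and proc_tree[ppid][0] == parent_pid)
--         ):
--             return True
--     return False
-- ===== Notes on version B (the rewrite author's own statement) =====
-- stated objective: simpler
-- what changed: Replaces A's three passes (build children set, extend to descendants set, scan descendants for the command) by one early-exiting pass over the entries that checks two-level ancestry directly with dict lookups.
import Mathlib
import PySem

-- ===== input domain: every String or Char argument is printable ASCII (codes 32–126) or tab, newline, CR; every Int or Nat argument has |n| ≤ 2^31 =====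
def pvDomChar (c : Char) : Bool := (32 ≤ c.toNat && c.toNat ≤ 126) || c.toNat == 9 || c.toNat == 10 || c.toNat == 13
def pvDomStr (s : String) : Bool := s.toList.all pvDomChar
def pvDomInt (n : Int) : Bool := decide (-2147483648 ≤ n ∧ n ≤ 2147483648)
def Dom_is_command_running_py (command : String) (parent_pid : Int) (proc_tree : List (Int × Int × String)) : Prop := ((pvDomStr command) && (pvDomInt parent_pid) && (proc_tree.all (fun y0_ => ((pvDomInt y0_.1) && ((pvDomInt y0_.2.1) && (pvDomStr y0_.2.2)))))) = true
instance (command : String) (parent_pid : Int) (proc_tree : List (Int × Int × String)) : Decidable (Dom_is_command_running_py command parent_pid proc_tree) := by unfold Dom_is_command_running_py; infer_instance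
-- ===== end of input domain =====

-- B replaces A's three collecting passes by one early-exiting pass with two dict lookups per
-- entry (simpler); the dict argument is represented as an association list, normalised by
-- PySem.Dict.ofList (Python dict semantics: duplicate keys overwrite) in both ports.

-- ===== PORT A =====
def is_command_running_py (command : String) (parent_pid : Int) (proc_tree : List (Int × Int × String)) : Bool :=
  let d := PySem.Dict.ofList proc_tree
  -- children = {pid for pid, (ppid, _) in proc_tree.items() if ppid == parent_pid}
  let children : PySem.Set Int :=
    d.items.foldl (fun s x => if x.2.1 == parent_pid then PySem.Set.add s x.1 else s) PySem.Set.empty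
  -- descendants = set(children); for pid, (ppid, _) in …: if ppid in children: descendants.add(pid)
  let descendants : PySem.Set Int :=
    d.items.foldl (fun s x => if PySem.Set.contains children x.2.1 then PySem.Set.add s x.1 else s)
      (PySem.Set.ofList children)
  -- any(command in proc_tree[pid][1] for pid in descendants if pid in proc_tree)
  List.any descendants (fun pid =>
    PySem.Dict.contains d pid &&
      (match PySem.Dict.get? d pid with
       | some c => PySem.Str.isIn command c.2
       | none => false))

-- ===== PORT B =====
-- the early-returning for-loop of Source B
def pvAltGo (command : String) (parent_pid : Int) (d : PySem.Dict Int (Int × String)) : List (Int × Int × String) → Bool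
  | [] => false
  | x :: rest =>
    if PySem.Str.isIn command x.2.2 &&
        (x.2.1 == parent_pid ||
          (match PySem.Dict.get? d x.2.1 with
           | some c => c.1 == parent_pid
           | none => false)) then true
    else pvAltGo command parent_pid d rest

def is_command_running_py_alt (command : String) (parent_pid : Int) (proc_tree : List (Int × Int × String)) : Bool :=
  let d := PySem.Dict.ofList proc_tree
  pvAltGo command parent_pid d d.items

-- ===== PRECONDITION & SPEC =====
def Spec_is_command_running_py (command : String) (parent_pid : Int) (proc_tree : List (Int × Int × String)) (out : Bool) : Prop := out = is_command_running_py_alt command parent_pid proc_tree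
instance (command : String) (parent_pid : Int) (proc_tree : List (Int × Int × String)) (out : Bool) : Decidable (Spec_is_command_running_py command parent_pid proc_tree out) := by unfold Spec_is_command_running_py; infer_instance

-- ===== CLAIM (what is proved, stated in full; the proofs are below) =====
def Claim_equal_is_command_running_py : Prop := ∀ (command : String) (parent_pid : Int) (proc_tree : List (Int × Int × String)), Dom_is_command_running_py command parent_pid proc_tree → Spec_is_command_running_py command parent_pid proc_tree (is_command_running_py command parent_pid proc_tree)

-- ===== LEMMAS AND PROOFS =====

-- membership in a fold that conditionally adds first components to a set
theorem pv_mem_fold (q : Int × Int × String → Bool)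
    (l : List (Int × Int × String)) (s : PySem.Set Int) (pid : Int) :
    pid ∈ l.foldl (fun s x => if q x then PySem.Set.add s x.1 else s) s ↔
      pid ∈ s ∨ ∃ x ∈ l, q x = true ∧ x.1 = pid := by
  induction l generalizing s with
  | nil => simp
  | cons y t ih =>
    simp only [List.foldl_cons, ih, List.mem_cons]
    by_cases hq : q y = true <;>
      simp [hq, PySem.Set.mem_add] <;> tauto

-- B's loop is List.any over the entries
theorem pv_altGo_eq_any (command : String) (parent_pid : Int) (d : PySem.Dict Int (Int × String))
    (l : List (Int × Int × String)) :
    pvAltGo command parent_pid d l =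
      l.any (fun x => PySem.Str.isIn command x.2.2 &&
        (x.2.1 == parent_pid ||
          (match PySem.Dict.get? d x.2.1 with
           | some c => c.1 == parent_pid
           | none => false))) := by
  induction l with
  | nil => rfl
  | cons y t ih =>
    rw [pvAltGo, List.any_cons, ih]
    cases (PySem.Str.isIn command y.2.2 &&
        (y.2.1 == parent_pid ||
          (match PySem.Dict.get? d y.2.1 with
           | some c => c.1 == parent_pid
           | none => false))) <;> simp

-- the main equivalence, for any dict with unique keys (as ofList produces)
theorem pv_main (command : String) (parent_pid : Int) (d : PySem.Dict Int (Int × String))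
    (hk : d.keys.Nodup) :
    (let children : PySem.Set Int :=
      d.items.foldl (fun s x => if x.2.1 == parent_pid then PySem.Set.add s x.1 else s) PySem.Set.empty
    let descendants : PySem.Set Int :=
      d.items.foldl (fun s x => if PySem.Set.contains children x.2.1 then PySem.Set.add s x.1 else s)
        (PySem.Set.ofList children)
    List.any descendants (fun pid =>
      PySem.Dict.contains d pid &&
        (match PySem.Dict.get? d pid with
         | some c => PySem.Str.isIn command c.2
         | none => false))) = pvAltGo command parent_pid d d.items := by
  simp only []
  set children : PySem.Set Int :=
    d.items.foldl (fun s x => if x.2.1 == parent_pid then PySem.Set.add s x.1 else s) PySem.Set.empty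
    with hch
  have hchmem : ∀ pid : Int, pid ∈ children ↔ ∃ x ∈ d.items, x.2.1 = parent_pid ∧ x.1 = pid := by
    intro pid
    rw [hch, pv_mem_fold]
    simp [PySem.Set.empty, beq_iff_eq]
  set descendants : PySem.Set Int :=
    d.items.foldl (fun s x => if PySem.Set.contains children x.2.1 then PySem.Set.add s x.1 else s)
      (PySem.Set.ofList children) with hde
  have hdemem : ∀ pid : Int, pid ∈ descendants ↔
      pid ∈ children ∨ ∃ x ∈ d.items, (PySem.Set.contains children x.2.1) = true ∧ x.1 = pid := by
    intro pid
    rw [hde, pv_mem_fold]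
    simp [PySem.Set.mem_ofList]
  have hget : ∀ x : Int × Int × String, x ∈ d.items → PySem.Dict.get? d x.1 = some x.2 := by
    intro x hx
    exact PySem.Dict.get?_of_mem_items d (by simpa using hx) hk
  rw [pv_altGo_eq_any]
  apply Bool.eq_iff_iff.mpr
  rw [List.any_eq_true, List.any_eq_true]
  constructor
  · rintro ⟨pid, hpid, hf⟩
    have hx : ∃ x ∈ d.items, x.1 = pid := by
      rcases (hdemem pid).mp hpid with h | ⟨x, hx, _, hxp⟩
      · rcases (hchmem pid).mp h with ⟨x, hx, _, hxp⟩
        exact ⟨x, hx, hxp⟩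
      · exact ⟨x, hx, hxp⟩
    rcases hx with ⟨x, hx, rfl⟩
    have hg := hget x hx
    rw [hg] at hf
    rw [Bool.and_eq_true] at hf
    have hin : PySem.Str.isIn command x.2.2 = true := hf.2
    refine ⟨x, hx, ?_⟩
    rw [Bool.and_eq_true, Bool.or_eq_true]
    refine ⟨hin, ?_⟩
    rcases (hdemem x.1).mp hpid with h | ⟨z, hz, hzc, hzp⟩
    · -- x.1 is itself a direct child: its entry (which is x) has ppid = parent_pid
      rcases (hchmem x.1).mp h with ⟨y, hy, hyp, hy1⟩
      have hgy := hget y hy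
      rw [hy1, hg] at hgy
      have hxy : x.2 = y.2 := Option.some.inj hgy
      left
      rw [beq_iff_eq, hxy]
      exact hyp
    · -- x.1 was added because entry z (= x, by unique keys) has its ppid in children
      have hgz := hget z hz
      rw [hzp, hg] at hgz
      have hxz : x.2 = z.2 := Option.some.inj hgz
      rcases (hchmem z.2.1).mp ((PySem.Set.contains_iff children z.2.1).mp hzc)
        with ⟨y, hy, hyp, hy1⟩
      have hgy := hget y hy
      rw [hy1] at hgy
      right
      rw [hxz, hgy]
      simp [hyp]
  · rintro ⟨x, hx, hP⟩
    rw [Bool.and_eq_true, Bool.or_eq_true] at hP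
    refine ⟨x.1, ?_, ?_⟩
    · rw [hdemem]
      rcases hP.2 with h | h
      · exact Or.inl ((hchmem x.1).mpr ⟨x, hx, beq_iff_eq.mp h, rfl⟩)
      · cases hc : PySem.Dict.get? d x.2.1 with
        | none => rw [hc] at h; simp at h
        | some c =>
          rw [hc] at h
          refine Or.inr ⟨x, hx, ?_, rfl⟩
          rw [PySem.Set.contains_iff]
          exact (hchmem x.2.1).mpr
            ⟨(x.2.1, c), PySem.Dict.mem_items_of_get?_eq_some d hc, beq_iff_eq.mp h, rfl⟩
    · rw [hget x hx, Bool.and_eq_true]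
      refine ⟨?_, hP.1⟩
      rw [PySem.Dict.contains_iff_mem_keys]
      simp only [PySem.Dict.keys]
      exact List.mem_map.mpr ⟨x, hx, rfl⟩

-- ===== VERDICT (by name: the statement is the Claim_ definition above) =====
theorem is_command_running_py_spec : Claim_equal_is_command_running_py := by
  intro command parent_pid proc_tree _
  unfold Spec_is_command_running_py is_command_running_py is_command_running_py_alt
  exact pv_main command parent_pid (PySem.Dict.ofList proc_tree) (PySem.Dict.nodup_keys_ofList proc_tree)
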